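-- pv_equiv track=rewrite | github.com/KYOHEI-jp/threads-book-bot | generate_gadget_article.py | rest_lines
-- ===== SOURCE A (Python) =====
-- def rest_lines(text: str) -> str:
--     lines = text.splitlines()
--     found = False
--     rest = []
--     for line in lines:
--         if not found and line.strip():
--             found = True
--             continue
--         rest.append(line)
--     return "\n".join(rest).strip()
-- ===== SOURCE B (Python) =====
-- def rest_lines(text: str) -> str:
--     lines = text.splitlines()
--     for i, line in enumerate(lines):
--         if line.strip():
--             return "\n".join(lines[i + 1:]).strip()
--     return ""
-- ===== Notes on version B (the rewrite author's own statement) =====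
-- stated objective: simpler
-- what changed: Replaces the accumulate-with-found-flag pass by locate-then-slice: B finds the first line whose strip() is truthy and returns the joined remaining slice, stripped (the leading whitespace-only lines A collects are absorbed by A's final strip), or the empty string if no such line exists.
import Mathlib
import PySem

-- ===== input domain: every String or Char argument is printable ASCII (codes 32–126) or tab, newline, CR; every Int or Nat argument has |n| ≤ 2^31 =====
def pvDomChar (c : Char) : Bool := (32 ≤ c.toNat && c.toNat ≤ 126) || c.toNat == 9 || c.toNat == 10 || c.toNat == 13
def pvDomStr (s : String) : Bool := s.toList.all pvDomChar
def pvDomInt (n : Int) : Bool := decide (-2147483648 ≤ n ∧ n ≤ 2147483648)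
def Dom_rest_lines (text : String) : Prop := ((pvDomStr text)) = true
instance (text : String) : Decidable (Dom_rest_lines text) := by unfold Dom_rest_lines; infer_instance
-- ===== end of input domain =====

-- B replaces A's accumulate-with-found-flag pass by locate-first-non-empty-line-then-slice (simpler decomposition; same cost).


-- ===== PORT A =====
-- the body of A's for-loop: state = (found, rest)
def rest_lines_step (st : Bool × List String) (line : String) : Bool × List String :=
  if st.1 = false ∧ PySem.Str.strip line ≠ "" then (true, st.2) else (st.1, st.2 ++ [line])

def rest_lines (text : String) : String :=
  let lines := PySem.Str.splitlines text
  let st := lines.foldl rest_lines_step (false, [])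
  PySem.Str.strip (PySem.Str.join "\n" st.2)

-- ===== PORT B =====
-- Source B's enumerate loop: at the first line whose strip() is truthy, return the join of the remaining slice, stripped
def rest_lines_alt_go : List String → String
  | [] => ""
  | line :: ls =>
      if PySem.Str.strip line ≠ "" then PySem.Str.strip (PySem.Str.join "\n" ls)
      else rest_lines_alt_go ls

def rest_lines_alt (text : String) : String :=
  rest_lines_alt_go (PySem.Str.splitlines text)

-- ===== PRECONDITION & SPEC =====
def Spec_rest_lines (text : String) (out : String) : Prop := out = rest_lines_alt text
instance (text : String) (out : String) : Decidable (Spec_rest_lines text out) := by unfold Spec_rest_lines; infer_instance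

-- ===== CLAIM (what is proved, stated in full; the proofs are below) =====
def Claim_equal_rest_lines : Prop := ∀ (text : String), Dom_rest_lines text → Spec_rest_lines text (rest_lines text)

-- ===== LEMMAS AND PROOFS =====

-- once found = true, A's loop just appends every remaining line
theorem restA_foldl_true (ls acc : List String) :
    ls.foldl rest_lines_step (true, acc) = (true, acc ++ ls) := by
  induction ls generalizing acc with
  | nil => simp
  | cons l t ih => simp [rest_lines_step, ih]

-- lines already accumulated ride along as a prefix of A's state
theorem restA_foldl_prefix (ls : List String) (b : Bool) (a1 a2 : List String) :
    ls.foldl rest_lines_step (b, a1 ++ a2) =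
      ((ls.foldl rest_lines_step (b, a2)).1, a1 ++ (ls.foldl rest_lines_step (b, a2)).2) := by
  induction ls generalizing b a2 with
  | nil => simp
  | cons l t ih =>
      simp only [List.foldl_cons, rest_lines_step]
      by_cases h : b = false ∧ PySem.Str.strip l ≠ "" <;>
        simp [h, ih, List.append_assoc]

-- strip l = "" means every character of l is whitespace
theorem all_isspace_of_strip_eq_nil (cs : List Char) (h : PySem.Chars.strip cs = []) :
    ∀ c ∈ cs, PySem.Chars.isspace c = true := by
  have hdrop : List.dropWhile PySem.Chars.isspace (PySem.Chars.lstrip cs).reverse = [] := by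
    unfold PySem.Chars.strip PySem.Chars.rstrip at h
    exact List.reverse_eq_nil_iff.mp h
  have h1 : ∀ c ∈ PySem.Chars.lstrip cs, PySem.Chars.isspace c = true := by
    intro c hc
    exact List.dropWhile_eq_nil_iff.mp hdrop c (by simpa using hc)
  intro c hc
  rw [← List.takeWhile_append_dropWhile (p := PySem.Chars.isspace) (l := cs)] at hc
  rcases List.mem_append.mp hc with h2 | h2
  · exact List.mem_takeWhile_imp h2
  · exact h1 c h2

-- a whitespace-only prefix is erased by lstrip
theorem lstrip_ws_append (l m : List Char) (h : ∀ c ∈ l, PySem.Chars.isspace c = true) :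
    PySem.Chars.lstrip (l ++ m) = PySem.Chars.lstrip m := by
  unfold PySem.Chars.lstrip
  rw [List.dropWhile_append]
  simp [List.dropWhile_eq_nil_iff.mpr h]

-- dropping a whitespace-only first line does not change join-then-strip
theorem strip_join_cons_ws (l : String) (r : List String) (h : PySem.Str.strip l = "") :
    PySem.Str.strip (PySem.Str.join "\n" (l :: r)) = PySem.Str.strip (PySem.Str.join "\n" r) := by
  have hnil : PySem.Chars.strip l.toList = [] := by
    have := congrArg String.toList h
    simpa [PySem.Str.strip] using this
  have hws := all_isspace_of_strip_eq_nil l.toList hnil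
  cases r with
  | nil =>
      simp only [PySem.Str.strip, PySem.Str.join, List.map, PySem.Chars.join_singleton,
        PySem.Chars.join_nil, String.toList_ofList]
      rw [hnil]
      rfl
  | cons y ys =>
      simp only [PySem.Str.strip, PySem.Str.join, String.toList_ofList, List.map_cons]
      apply congrArg String.ofList
      rw [PySem.Chars.join_cons_cons]
      unfold PySem.Chars.strip
      have hnl : ∀ c ∈ "\n".toList, PySem.Chars.isspace c = true := by
        rw [show "\n".toList = ['\n'] from rfl]
        intro c hc; simp at hc; subst hc; decide
      rw [List.append_assoc, lstrip_ws_append _ _ hws, lstrip_ws_append _ _ hnl]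

-- the heart of the equivalence: A's fold over any line list equals B's scan
theorem rest_lines_go_eq (L : List String) :
    PySem.Str.strip (PySem.Str.join "\n" (L.foldl rest_lines_step (false, [])).2) =
      rest_lines_alt_go L := by
  induction L with
  | nil => decide
  | cons l t ih =>
      by_cases h : PySem.Str.strip l ≠ ""
      · have hstep : rest_lines_step (false, []) l = (true, []) := by
          simp [rest_lines_step, h]
        simp only [List.foldl_cons, hstep, restA_foldl_true, rest_lines_alt_go, if_pos h]
        simp
      · have h' : PySem.Str.strip l = "" := not_not.mp h
        have hstep : rest_lines_step (false, []) l = (false, [l]) := by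
          simp [rest_lines_step, h']
        have hpre := restA_foldl_prefix t false [l] []
        simp only [List.foldl_cons, hstep, List.append_nil] at *
        rw [show ([l] : List String) = [l] ++ [] by simp] at hpre ⊢
        rw [hpre]
        simp only [List.singleton_append]
        rw [strip_join_cons_ws l _ h']
        simpa [rest_lines_alt_go, h'] using ih

-- ===== VERDICT (by name: the statement is the Claim_ definition above) =====
theorem rest_lines_spec : Claim_equal_rest_lines := by
  intro text _
  show rest_lines text = rest_lines_alt text
  unfold rest_lines rest_lines_alt
  exact rest_lines_go_eq (PySem.Str.splitlines text)
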